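-- pv_equiv track=rewrite | github.com/daniel-reich/turbo-robot | MvtxpxtFDrzEtA9k5_5.py | palindrome_descendant
-- ===== SOURCE A (Python) =====
-- def palindrome_descendant(num):
--     def is_palindrome(num):
--         num = str(num)
--         if num=='':
--             return True
--         if num[0]!=num[-1]:
--             return False
--         elif num[0]==num[-1]:
--             return is_palindrome(num[1:-1])
--
--     if len(str(num))==1:
--         return False
--     if is_palindrome(num):
--         return True
--     else:
--         s = str(num)
--         try:
--             descendant = int(''.join([str(int(s[i])+int(s[i+1])) for i in range(0,len(s),2)]))
--             return palindrome_descendant(descendant)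
--         except:
--             return False
-- ===== SOURCE B (Python) =====
-- def palindrome_descendant(num):
--     while True:
--         s = str(num)
--         if len(s) == 1:
--             return False
--         if s == s[::-1]:
--             return True
--         if len(s) % 2 == 1 or s[0] == '-':
--             return False
--         it = iter(s)
--         num = int(''.join(str(int(a) + int(b)) for a, b in zip(it, it)))
-- ===== Notes on version B (the rewrite author's own statement) =====
-- stated objective: simpler
-- what changed: Replaces A's double recursion (a recursive char-stripping is_palindrome helper plus recursive descent) by a single iterative while-loop with a reversal test s == s[::-1] and explicit guards (odd length, leading '-') instead of try/except around the descendant computation, which pairs digits by zipping one iterator with itself.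
import Mathlib
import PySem

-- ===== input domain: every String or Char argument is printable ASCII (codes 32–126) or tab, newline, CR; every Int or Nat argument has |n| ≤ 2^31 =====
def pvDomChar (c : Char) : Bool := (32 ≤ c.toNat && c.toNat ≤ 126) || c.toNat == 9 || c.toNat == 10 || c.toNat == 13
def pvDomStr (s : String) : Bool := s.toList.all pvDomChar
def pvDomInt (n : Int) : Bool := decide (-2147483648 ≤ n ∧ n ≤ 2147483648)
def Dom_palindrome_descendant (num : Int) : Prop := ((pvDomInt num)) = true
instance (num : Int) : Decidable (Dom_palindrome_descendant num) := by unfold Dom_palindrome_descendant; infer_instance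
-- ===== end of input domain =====

-- B replaces A's recursive helper + recursive descent by an iterative loop with a reversal test and
-- explicit guards (odd length / minus sign) in place of try/except: same return value on every int.

-- ===== PORT A =====
-- is_palindrome, on the digit string (fuel bounds the recursion depth; called with more fuel than the length)
def pvIsPalA (fuel : Nat) (s : List Char) : Bool :=
  match fuel with
  | 0 => false
  | f + 1 =>
    if s = [] then true
    else if PySem.List.pyGet? s 0 ≠ PySem.List.pyGet? s (-1) then false
    else pvIsPalA f (PySem.List.slice s (some 1) (some (-1)))

-- the joined descendant string: [str(int(s[i])+int(s[i+1])) for i in range(0,len(s),2)] then ''.join;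
-- `none` exactly where Python raises (IndexError on s[i+1], ValueError from int('-'))
def pvBuildA (s : List Char) : List Int → Option (List Char)
  | [] => some []
  | i :: rest => do
    let a ← PySem.List.pyGet? s i
    let x ← PySem.Int.ofChars? [a]          -- int(s[i])
    let b ← PySem.List.pyGet? s (i + 1)
    let y ← PySem.Int.ofChars? [b]          -- int(s[i+1])
    let t ← pvBuildA s rest
    pure (PySem.Int.toChars (x + y) ++ t)   -- str(...) joined

def pvGoA (fuel : Nat) (num : Int) : Bool :=
  match fuel with
  | 0 => false
  | f + 1 =>
    let s := PySem.Int.toChars num          -- str(num)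
    if s.length == 1 then false
    else if pvIsPalA (s.length + 1) s then true
    else
      match pvBuildA s (PySem.List.pyRange 0 s.length 2) with
      | none => false                        -- except: return False
      | some cs =>
        match PySem.Int.ofChars? cs with     -- int(''.join(...))
        | none => false
        | some d => pvGoA f d

-- the recursive descendant is strictly smaller in |·| each step, so this fuel never runs out
def palindrome_descendant (num : Int) : Bool := pvGoA (num.natAbs + 1) num

-- ===== PORT B =====
def pvDigitB (c : Char) : Int := (c.toNat : Int) - 48  -- int(c): exact, c is a decimal digit here

-- ''.join(str(int(a) + int(b)) for a, b in zip(it, it)): consecutive pairs, two chars at a time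
def pvPairSumB : List Char → List Char
  | a :: b :: r => PySem.Int.toChars (pvDigitB a + pvDigitB b) ++ pvPairSumB r
  | _ => []

def pvGoB (fuel : Nat) (num : Int) : Bool :=
  match fuel with
  | 0 => false
  | f + 1 =>
    let s := PySem.Int.toChars num          -- str(num)
    if s.length == 1 then false
    else if s == s.reverse then true        -- s == s[::-1] (PySem.List.slice?_none_none_neg_one)
    else if s.length % 2 == 1 || PySem.List.pyGet? s 0 == some '-' then false
    else pvGoB f ((PySem.Int.ofChars? (pvPairSumB s)).getD 0)
         -- int(t): never none here (t is a nonempty digit string), .getD 0 only for totality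

def palindrome_descendant_alt (num : Int) : Bool := pvGoB (num.natAbs + 1) num

-- ===== PRECONDITION & SPEC =====
def Spec_palindrome_descendant (num : Int) (out : Bool) : Prop := out = palindrome_descendant_alt num
instance (num : Int) (out : Bool) : Decidable (Spec_palindrome_descendant num out) := by unfold Spec_palindrome_descendant; infer_instance

-- ===== CLAIM (what is proved, stated in full; the proofs are below) =====
def Claim_equal_palindrome_descendant : Prop := ∀ (num : Int), Dom_palindrome_descendant num → Spec_palindrome_descendant num (palindrome_descendant num)

-- ===== LEMMAS AND PROOFS =====

-- every character of Nat.toDigits 10 is some digitChar m with m < 10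
def pvDg (c : Char) : Prop := ∃ m, m < 10 ∧ c = Nat.digitChar m

theorem pv_mem_toDigitsCore : ∀ (f n : Nat) (l : List Char) (c : Char),
    c ∈ Nat.toDigitsCore 10 f n l → c ∈ l ∨ pvDg c := by
  intro f
  induction f with
  | zero => intro n l c h; exact Or.inl h
  | succ f ih =>
    intro n l c h
    simp only [Nat.toDigitsCore] at h
    by_cases h10 : n / 10 = 0
    · rw [if_pos h10] at h
      rcases List.mem_cons.mp h with h | h
      · exact Or.inr ⟨n % 10, Nat.mod_lt _ (by norm_num), h⟩
      · exact Or.inl h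
    · rw [if_neg h10] at h
      rcases ih _ _ _ h with h | h
      · rcases List.mem_cons.mp h with h | h
        · exact Or.inr ⟨n % 10, Nat.mod_lt _ (by norm_num), h⟩
        · exact Or.inl h
      · exact Or.inr h

theorem pv_toChars_digits {n : Int} (hn : 0 ≤ n) {c : Char}
    (hc : c ∈ PySem.Int.toChars n) : pvDg c := by
  unfold PySem.Int.toChars at hc
  rw [if_neg (by omega)] at hc
  rcases pv_mem_toDigitsCore _ _ _ _ hc with h | h
  · simp at h
  · exact h

theorem pv_dg_parse {c : Char} (h : pvDg c) :
    PySem.Int.ofChars? [c] = some (pvDigitB c) := by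
  obtain ⟨m, hm, rfl⟩ := h
  interval_cases m <;> decide

theorem pv_dg_ne_minus {c : Char} (h : pvDg c) : c ≠ '-' := by
  obtain ⟨m, hm, rfl⟩ := h
  interval_cases m <;> decide

-- step-2 range unfolding
theorem pv_pyRange_two_nil (a b : Int) (h : b ≤ a) : PySem.List.pyRange a b 2 = [] := by
  rw [PySem.List.pyRange_of_pos a b (by norm_num)]
  rw [if_neg (by omega)]
  simp

theorem pv_pyRange_two_cons (a b : Int) (h : a < b) :
    PySem.List.pyRange a b 2 = a :: PySem.List.pyRange (a + 2) b 2 := by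
  rw [PySem.List.pyRange_of_pos a b (by norm_num),
      PySem.List.pyRange_of_pos (a + 2) b (by norm_num)]
  by_cases h2 : a + 2 < b
  · rw [if_pos h, if_pos h2]
    have hc : ((b - a + 2 - 1) / 2).toNat = ((b - (a + 2) + 2 - 1) / 2).toNat + 1 := by omega
    rw [hc, List.range_succ_eq_map]
    simp only [List.map_cons, List.map_map]
    congr 1
    · norm_num
    · apply List.map_congr_left
      intro k _
      simp only [Function.comp_apply]
      push_cast
      ring
  · rw [if_pos h, if_neg h2]
    have hc : ((b - a + 2 - 1) / 2).toNat = 1 := by omega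
    rw [hc]
    simp

-- the descendant string builder of A, on a list of digit chars, equals B's pair-sum chunks
theorem pv_buildA_eq : ∀ (v u : List Char), (∀ c ∈ v, pvDg c) →
    pvBuildA (u ++ v) (PySem.List.pyRange u.length (u.length + v.length) 2) =
      if 2 ∣ v.length then some (pvPairSumB v) else none
  | [], u, _ => by
    rw [show ((u.length : Int) + ([] : List Char).length) = u.length by simp]
    rw [pv_pyRange_two_nil _ _ le_rfl]
    simp [pvBuildA, pvPairSumB]
  | [a], u, h => by
    rw [show ((([a] : List Char)).length : Int) = 1 by simp]
    have hlt : (u.length : Int) < (u.length : Int) + 1 := by omega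
    have hle : (u.length : Int) + 1 ≤ (u.length : Int) + 2 := by omega
    rw [pv_pyRange_two_cons _ _ hlt, pv_pyRange_two_nil _ _ hle]
    have h1 : PySem.List.pyGet? (u ++ [a]) u.length = some a :=
      PySem.List.pyGet?_append_length u [] a
    have h2 : PySem.List.pyGet? (u ++ [a]) ((u.length : Int) + 1) = none := by
      have := PySem.List.pyGet?_append_right u [a] 1
      simpa using this
    simp [pvBuildA, h2, pv_dg_parse (h a (by simp))]
  | a :: b :: w, u, h => by
    have key := pv_buildA_eq w (u ++ [a, b]) (fun c hc => h c (by simp [hc]))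
    have hL : ((u ++ [a, b]).length : Int) = (u.length : Int) + 2 := by push_cast; simp
    rw [hL, List.append_assoc] at key
    simp only [List.cons_append, List.nil_append] at key
    have hstop : ((u.length : Int) + 2) + (w.length : Int)
        = (u.length : Int) + ((a :: b :: w : List Char).length : Int) := by
      push_cast; simp; ring
    rw [hstop] at key
    rw [pv_pyRange_two_cons _ _ (by simp only [List.length_cons]; push_cast; omega)]
    have h1 : PySem.List.pyGet? (u ++ a :: b :: w) u.length = some a :=
      PySem.List.pyGet?_append_length u _ a
    have h2 : PySem.List.pyGet? (u ++ a :: b :: w) ((u.length : Int) + 1) = some b := by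
      have := PySem.List.pyGet?_append_right u (a :: b :: w) 1
      simpa using this
    have pa := pv_dg_parse (h a (by simp))
    have pb := pv_dg_parse (h b (by simp))
    have hpar : (2 ∣ (a :: b :: w : List Char).length) ↔ (2 ∣ w.length) := by
      simp only [List.length_cons]; omega
    simp only [List.length_cons] at key
    push_cast at key
    by_cases hd : 2 ∣ w.length
    · rw [if_pos (hpar.mpr hd)]
      rw [if_pos hd] at key
      simp [pvBuildA, h1, h2, pa, pb, key, pvPairSumB]
    · rw [if_neg (fun hh => hd (hpar.mp hh))]
      rw [if_neg hd] at key
      simp [pvBuildA, h1, h2, pa, pb, key]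
  termination_by v _ _ => v.length

-- A's recursive palindrome test is the reversal test
theorem pv_isPal_eq : ∀ (f : Nat) (s : List Char), s.length < f →
    pvIsPalA f s = (s == s.reverse) := by
  intro f
  induction f with
  | zero => intro s h; omega
  | succ f ih =>
    intro s hlen
    match s with
    | [] => simp [pvIsPalA]
    | a :: t =>
      rcases List.eq_nil_or_concat t with rfl | ⟨u, b, rfl⟩
      · have hsl : PySem.List.slice [a] (some 1) (some (-1)) = [] := by
          simp [PySem.List.slice, PySem.List.clampIdx]
        have hget : PySem.List.pyGet? [a] (-1) = some a := by
          rw [PySem.List.pyGet?_neg_one]; rfl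
        simp only [pvIsPalA, hsl, hget, PySem.List.pyGet?_zero_cons]
        rw [ih [] (by simpa using hlen)]
        simp
      · simp only [List.concat_eq_append]
        have hget0 : PySem.List.pyGet? (a :: (u ++ [b])) 0 = some a :=
          PySem.List.pyGet?_zero_cons _ _
        have hgetl : PySem.List.pyGet? (a :: (u ++ [b])) (-1) = some b := by
          rw [PySem.List.pyGet?_neg_one]
          rw [show a :: (u ++ [b]) = (a :: u) ++ [b] from rfl]
          exact List.getLast?_concat
        have hsl : PySem.List.slice (a :: (u ++ [b])) (some 1) (some (-1)) = u := by
          simp [PySem.List.slice, PySem.List.clampIdx]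
          rw [if_neg (by push_cast; omega)]
          rw [show u.length + 1 - 1 = u.length from rfl]
          exact List.take_left
        have hrev : (a :: (u ++ [b])).reverse = b :: (u.reverse ++ [a]) := by
          simp
        have hiff : (a :: (u ++ [b]) = (a :: (u ++ [b])).reverse) ↔ (a = b ∧ u = u.reverse) := by
          rw [hrev, List.cons.injEq]
          constructor
          · rintro ⟨rfl, h2⟩
            exact ⟨rfl, (List.append_left_inj _).mp h2⟩
          · rintro ⟨rfl, h2⟩
            exact ⟨rfl, by rw [← h2]⟩
        by_cases hab : a = b
        · subst hab
          simp only [pvIsPalA, hget0, hgetl, hsl]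
          rw [if_neg (by simp), if_neg (by simp)]
          rw [ih u (by simp at hlen ⊢; omega)]
          rw [Bool.eq_iff_iff]
          simp only [beq_iff_eq]
          rw [hiff]
          tauto
        · simp only [pvIsPalA, hget0, hgetl, hsl]
          rw [if_neg (by simp), if_pos (by simpa using hab)]
          rw [Bool.eq_iff_iff]
          simp only [beq_iff_eq]
          rw [hiff]
          tauto

theorem pv_goB_zero (f : Nat) : pvGoB f 0 = false := by
  cases f with
  | zero => rfl
  | succ f =>
    have h0 : PySem.Int.toChars 0 = ['0'] := by decide
    simp [pvGoB, h0]

theorem pv_go_eq : ∀ (f : Nat) (num : Int), pvGoA f num = pvGoB f num := by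
  intro f
  induction f with
  | zero => intro num; rfl
  | succ f ih =>
    intro num
    simp only [pvGoA, pvGoB]
    rw [pv_isPal_eq ((PySem.Int.toChars num).length + 1) _ (by omega)]
    by_cases hlen1 : ((PySem.Int.toChars num).length == 1) = true
    · rw [if_pos hlen1, if_pos hlen1]
    rw [if_neg hlen1, if_neg hlen1]
    by_cases hpal : (PySem.Int.toChars num == (PySem.Int.toChars num).reverse) = true
    · rw [if_pos hpal, if_pos hpal]
    rw [if_neg hpal, if_neg hpal]
    by_cases hneg : num < 0
    · -- str(num) starts with '-': A's int('-') raises, B's sign guard fires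
      have hs : PySem.Int.toChars num = '-' :: Nat.toDigits 10 num.natAbs := by
        unfold PySem.Int.toChars; rw [if_pos hneg]
      rw [hs]
      rw [pv_pyRange_two_cons _ _ (by simp only [List.length_cons]; push_cast; omega)]
      simp [pvBuildA,
        show PySem.Int.ofChars? ['-'] = none from by decide]
    · -- num ≥ 0: every char of str(num) is a digit
      rw [Int.not_lt] at hneg
      have hDg : ∀ c ∈ PySem.Int.toChars num, pvDg c := fun c hc => pv_toChars_digits hneg hc
      have key := pv_buildA_eq (PySem.Int.toChars num) [] hDg
      simp only [List.nil_append, List.length_nil, Nat.cast_zero, zero_add] at key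
      rw [key]
      by_cases hpar : 2 ∣ (PySem.Int.toChars num).length
      · rw [if_pos hpar]
        -- s is nonempty (else it would be a palindrome), so its head is a digit, not '-'
        have hne : PySem.Int.toChars num ≠ [] := by
          intro h0; rw [h0] at hpal; simp at hpal
        obtain ⟨c, s', hs'⟩ := List.exists_cons_of_ne_nil hne
        have hcm : (PySem.List.pyGet? (PySem.Int.toChars num) 0 == some '-') = false := by
          rw [hs', PySem.List.pyGet?_zero_cons]
          have := pv_dg_ne_minus (hDg c (by rw [hs']; simp))
          simpa using this
        have hmod : ((PySem.Int.toChars num).length % 2 == 1) = false := by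
          simp only [beq_eq_false_iff_ne, ne_eq]; omega
        rw [hmod, hcm]
        simp only [Bool.or_self, Bool.false_eq_true, if_false]
        cases hoc : PySem.Int.ofChars? (pvPairSumB (PySem.Int.toChars num)) with
        | none => simp [pv_goB_zero]
        | some d => simpa using ih d
      · rw [if_neg hpar]
        have hmod : ((PySem.Int.toChars num).length % 2 == 1) = true := by
          simp only [beq_iff_eq]; omega
        rw [hmod]
        simp

-- ===== VERDICT (by name: the statement is the Claim_ definition above) =====
theorem palindrome_descendant_spec : Claim_equal_palindrome_descendant := by
  intro num _
  unfold Spec_palindrome_descendant palindrome_descendant palindrome_descendant_alt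
  exact pv_go_eq _ _
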